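-- pv_equiv track=rewrite | github.com/samstevenm/pl2303_rfid | rfid_app_3.py | _hextostr
-- ===== SOURCE A (Python) =====
-- def _hextostr(s):
--     hex = ""
--     tmp = None
--     for c in s:
--         # convert hex character to num value
--         if c == ' ': continue
--         elif '0' <= c and c <= '9': c = ord(c) - ord('0')
--         elif 'a' <= c and c <= 'f': c = ord(c) - ord('a') + 10
--         elif 'A' <= c and c <= 'F': c = ord(c) - ord('A') + 10
--         else: raise ValueError("not an hexadecimal character: %c" % c)
--
--         # compute string
--         if tmp == None:
--             tmp = c
--         else:
--             hex = hex + chr((tmp<<4)|c)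
--             tmp = None
--     if tmp != None: raise ValueError("even number of hexadecimal characters")
--     return hex
-- ===== SOURCE B (Python) =====
-- def _hextostr(s):
--     nibbles = []
--     for c in s:
--         if c == ' ':
--             continue
--         elif '0' <= c and c <= '9':
--             nibbles.append(ord(c) - ord('0'))
--         elif 'a' <= c and c <= 'f':
--             nibbles.append(ord(c) - ord('a') + 10)
--         elif 'A' <= c and c <= 'F':
--             nibbles.append(ord(c) - ord('A') + 10)
--         else:
--             raise ValueError("not an hexadecimal character: %c" % c)
--     if len(nibbles) % 2 == 1:
--         raise ValueError("even number of hexadecimal characters")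
--     return ''.join(chr((nibbles[i] << 4) | nibbles[i + 1]) for i in range(0, len(nibbles), 2))
-- ===== Notes on version B (the rewrite author's own statement) =====
-- stated objective: alternative
-- what changed: Replaces A's single-pass toggle (a tmp half-byte carried through the loop, emitting a character whenever it fills) by a collect-then-pair two-pass structure: one pass gathers all nibble values into a list, the odd-count check moves after the loop, and the output is built by pairing the list two at a time.
import Mathlib
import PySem

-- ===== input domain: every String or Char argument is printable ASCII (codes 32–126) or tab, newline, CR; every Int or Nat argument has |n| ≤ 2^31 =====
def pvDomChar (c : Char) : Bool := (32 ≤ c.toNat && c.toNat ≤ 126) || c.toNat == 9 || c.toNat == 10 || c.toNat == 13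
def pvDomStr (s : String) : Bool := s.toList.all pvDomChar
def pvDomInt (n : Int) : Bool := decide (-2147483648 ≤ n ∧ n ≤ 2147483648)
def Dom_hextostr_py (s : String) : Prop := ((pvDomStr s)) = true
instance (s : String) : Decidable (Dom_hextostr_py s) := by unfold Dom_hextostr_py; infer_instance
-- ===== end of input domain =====

-- B changes A's single-pass half-byte toggle into a collect-nibbles-then-pair two-pass structure; alternative decomposition, not faster.

-- nibble value of a hex character (the shared four-way branch); none = ValueError
def hexVal (c : Char) : Option Nat :=
  if '0' ≤ c ∧ c ≤ '9' then some (c.toNat - '0'.toNat)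
  else if 'a' ≤ c ∧ c ≤ 'f' then some (c.toNat - 'a'.toNat + 10)
  else if 'A' ≤ c ∧ c ≤ 'F' then some (c.toNat - 'A'.toNat + 10)
  else none

-- ===== PORT A =====
-- A's loop: accumulator `hex` (as List Char), toggle `tmp`; none = a ValueError path.
def aLoop : List Char → Option Nat → List Char → Option (List Char)
  | [], none, hex => some hex
  | [], some _, _ => none          -- "even number of hexadecimal characters"
  | c :: rest, tmp, hex =>
    if c = ' ' then aLoop rest tmp hex
    else
      match hexVal c with
      | none => none               -- "not an hexadecimal character"
      | some v =>
        match tmp with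
        | none => aLoop rest (some v) hex
        | some t => aLoop rest none (hex ++ [Char.ofNat ((t <<< 4) ||| v)])

def hextostr_py (s : String) : String :=
  match aLoop s.toList none [] with
  | some hex => String.mk hex
  | none => ""                     -- unreachable under Pre_ (Python raises here)

-- ===== PORT B =====
-- B's first pass: collect nibble values, skipping spaces; none = invalid character.
def collectNibbles : List Char → Option (List Nat)
  | [] => some []
  | c :: rest =>
    if c = ' ' then collectNibbles rest
    else
      match hexVal c with
      | none => none
      | some v => (collectNibbles rest).map (v :: ·)

-- B's second pass: pair the nibbles two at a time.
def pairChars : List Nat → List Char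
  | a :: b :: rest => Char.ofNat ((a <<< 4) ||| b) :: pairChars rest
  | _ => []

def hextostr_py_alt (s : String) : String :=
  match collectNibbles s.toList with
  | none => ""                     -- unreachable under Pre_ (Python raises here)
  | some ns => if ns.length % 2 = 1 then "" else String.mk (pairChars ns)

-- ===== PRECONDITION & SPEC =====
-- Pre_ excludes exactly the inputs on which Python A raises ValueError:
-- a non-space non-hex character, or an odd number of hex digits.
def Pre_hextostr_py (s : String) : Prop :=
  (s.toList.all (fun c => c == ' ' || (hexVal c).isSome)) = true ∧
  (s.toList.filter (· ≠ ' ')).length % 2 = 0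
instance (s : String) : Decidable (Pre_hextostr_py s) := by unfold Pre_hextostr_py; infer_instance

def pvWitness_hextostr_py : String := "4a 2B"

def Spec_hextostr_py (s : String) (out : String) : Prop := out = hextostr_py_alt s
instance (s : String) (out : String) : Decidable (Spec_hextostr_py s out) := by unfold Spec_hextostr_py; infer_instance

-- ===== CLAIM (what is proved, stated in full; the proofs are below) =====
def Claim_equal_hextostr_py : Prop :=
  ∀ (s : String), Dom_hextostr_py s → Pre_hextostr_py s → Spec_hextostr_py s (hextostr_py s)

-- ===== LEMMAS AND PROOFS =====

-- A's finish, parametrised by the pending toggle state.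
def finishA (tmp : Option Nat) (ns : List Nat) (hex : List Char) : Option (List Char) :=
  match tmp, ns with
  | none, ns => if ns.length % 2 = 1 then none else some (hex ++ pairChars ns)
  | some _, [] => none
  | some t, v :: rest =>
    if rest.length % 2 = 1 then none
    else some (hex ++ Char.ofNat ((t <<< 4) ||| v) :: pairChars rest)

theorem aLoop_eq (l : List Char) :
    ∀ (tmp : Option Nat) (hex : List Char),
      aLoop l tmp hex = (collectNibbles l).bind (fun ns => finishA tmp ns hex) := by
  induction l with
  | nil =>
    intro tmp hex
    cases tmp <;> simp [aLoop, collectNibbles, finishA, pairChars]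
  | cons c rest ih =>
    intro tmp hex
    by_cases hsp : c = ' '
    · simp [aLoop, collectNibbles, hsp, ih]
    · cases hv : hexVal c with
      | none => simp [aLoop, collectNibbles, hsp, hv]
      | some v =>
        cases tmp with
        | none =>
          simp only [aLoop, collectNibbles, if_neg hsp, hv, ih]
          cases hns : collectNibbles rest with
          | none => rfl
          | some ns =>
            simp only [Option.map_some, Option.bind_some]
            cases ns with
            | nil => simp [finishA, pairChars]
            | cons w ws =>
              simp only [finishA, pairChars, List.length_cons,
                show (ws.length + 1 + 1) % 2 = ws.length % 2 from by omega]
        | some t =>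
          simp only [aLoop, collectNibbles, if_neg hsp, hv, ih]
          cases hns : collectNibbles rest with
          | none => rfl
          | some ns =>
            simp only [Option.map_some, Option.bind_some, finishA, List.length_cons]
            split_ifs with ha
            · rfl
            · simp

theorem collect_isSome_of_pre (l : List Char)
    (h : ∀ c ∈ l, c = ' ' ∨ (hexVal c).isSome) :
    ∃ ns, collectNibbles l = some ns ∧ ns.length = (l.filter (· ≠ ' ')).length := by
  induction l with
  | nil => exact ⟨[], rfl, rfl⟩
  | cons c rest ih =>
    obtain ⟨ns, hns, hlen⟩ := ih (fun x hx => h x (List.mem_cons_of_mem _ hx))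
    by_cases hsp : c = ' '
    · refine ⟨ns, ?_, ?_⟩
      · simp [collectNibbles, hsp, hns]
      · simp [hsp, hlen]
    · rcases h c (List.mem_cons_self) with h' | h'
      · exact absurd h' hsp
      · obtain ⟨v, hv⟩ := Option.isSome_iff_exists.mp h'
        refine ⟨v :: ns, ?_, ?_⟩
        · simp [collectNibbles, hsp, hv, hns]
        · simp [List.filter_cons, hsp, hlen]

-- ===== VERDICT (by name: the statement is the Claim_ definition above) =====
theorem hextostr_py_spec : Claim_equal_hextostr_py := by
  intro s _ hpre
  obtain ⟨hchars, heven⟩ := hpre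
  have hchars' : ∀ c ∈ s.toList, c = ' ' ∨ (hexVal c).isSome := by
    intro c hc
    have := List.all_eq_true.mp hchars c hc
    simpa using this
  obtain ⟨ns, hns, hlen⟩ := collect_isSome_of_pre s.toList hchars'
  unfold Spec_hextostr_py hextostr_py hextostr_py_alt
  rw [aLoop_eq, hns]
  have hodd : ¬ ns.length % 2 = 1 := by omega
  simp [finishA, hodd]
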